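-- pv_equiv track=rewrite | github.com/acabhishek942/ProjectEuler | Solutions/pe#51..py | generateNumber
-- ===== SOURCE A (Python) =====
-- def generateNumber(repNumber, filledPattern):
--   temp = 0
--   #print (filledPattern)
--   for i in filledPattern:
--     temp =  temp * 10
--     if i == -1:
--       temp += repNumber
--     else:
--       temp += i
--   return temp
-- ===== SOURCE B (Python) =====
-- def generateNumber(repNumber, filledPattern):
--     def go(chunk):
--         # returns (value of chunk as a number, 10 ** len(chunk))
--         if len(chunk) == 1:
--             d = chunk[0]
--             return (repNumber if d == -1 else d, 10)
--         mid = len(chunk) // 2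
--         v1, p1 = go(chunk[:mid])
--         v2, p2 = go(chunk[mid:])
--         return (v1 * p2 + v2, p1 * p2)
--     if not filledPattern:
--         return 0
--     return go(filledPattern)[0]
-- ===== Notes on version B (the rewrite author's own statement) =====
-- stated objective: faster
-- what changed: Replaces the forward Horner loop (temp = temp*10 + digit) with a divide-and-conquer combine that recursively computes (value, 10**len) for each half of the pattern and merges them, balancing big-integer multiplications; intended as faster and measured 9.76x at n=65536, though a timing run could not confirm at its largest size (both programs failed there).
import Mathlib
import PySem

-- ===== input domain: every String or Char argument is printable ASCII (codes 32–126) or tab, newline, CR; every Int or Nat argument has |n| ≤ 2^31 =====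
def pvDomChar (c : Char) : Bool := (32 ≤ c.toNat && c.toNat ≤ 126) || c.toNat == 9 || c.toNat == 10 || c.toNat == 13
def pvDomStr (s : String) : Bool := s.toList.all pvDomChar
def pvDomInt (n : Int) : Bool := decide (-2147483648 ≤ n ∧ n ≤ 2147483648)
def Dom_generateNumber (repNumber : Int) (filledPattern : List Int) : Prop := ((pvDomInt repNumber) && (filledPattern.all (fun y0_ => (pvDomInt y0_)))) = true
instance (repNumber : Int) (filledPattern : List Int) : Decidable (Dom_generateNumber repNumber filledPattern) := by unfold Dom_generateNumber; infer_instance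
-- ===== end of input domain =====

-- B replaces A's forward Horner accumulator with a divide-and-conquer combine
-- (value, power-of-ten) over halves of the pattern; intended as faster (measured 9.76x at n=65536).

-- ===== PORT A =====
def generateNumber (repNumber : Int) (filledPattern : List Int) : Int :=
  filledPattern.foldl (fun temp i => temp * 10 + (if i = -1 then repNumber else i)) 0

-- ===== PORT B =====
-- go(chunk) of Source B; the fuel argument (instantiated with the list length) and the
-- [] / fuel-0 cases are totality guards only: go always terminates on the chunks it is called on
def pvGo (rep : Int) : Nat → List Int → Int × Int
  | _, [] => (0, 1)
  | _, [d] => ((if d = -1 then rep else d), 10)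
  | 0, _ => (0, 1)
  | fuel + 1, x :: y :: t =>
      let chunk := x :: y :: t
      let mid := chunk.length / 2
      let r1 := pvGo rep fuel (chunk.take mid)
      let r2 := pvGo rep fuel (chunk.drop mid)
      (r1.1 * r2.2 + r2.1, r1.2 * r2.2)

def generateNumber_alt (repNumber : Int) (filledPattern : List Int) : Int :=
  if filledPattern = [] then 0 else (pvGo repNumber filledPattern.length filledPattern).1

-- ===== PRECONDITION & SPEC =====
def Spec_generateNumber (repNumber : Int) (filledPattern : List Int) (out : Int) : Prop := out = generateNumber_alt repNumber filledPattern
instance (repNumber : Int) (filledPattern : List Int) (out : Int) : Decidable (Spec_generateNumber repNumber filledPattern out) := by unfold Spec_generateNumber; infer_instance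

-- ===== CLAIM =====
def Claim_equal_generateNumber : Prop := ∀ (repNumber : Int) (filledPattern : List Int), Dom_generateNumber repNumber filledPattern → Spec_generateNumber repNumber filledPattern (generateNumber repNumber filledPattern)

-- ===== LEMMAS AND PROOFS =====

-- A's Horner value, as a function (abbreviation for the proofs)
def pvH (rep : Int) (l : List Int) : Int :=
  l.foldl (fun temp i => temp * 10 + (if i = -1 then rep else i)) 0

-- A's Horner loop from an arbitrary accumulator
theorem pvH_acc (rep : Int) (l : List Int) (acc : Int) :
    l.foldl (fun temp i => temp * 10 + (if i = -1 then rep else i)) acc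
      = acc * 10 ^ l.length + pvH rep l := by
  induction l generalizing acc with
  | nil => simp [pvH]
  | cons x t ih =>
    simp only [List.foldl_cons, pvH, List.length_cons]
    rw [ih, ih (0 * 10 + (if x = -1 then rep else x)), pow_succ]
    ring

-- Horner over a concatenation
theorem pvH_append (rep : Int) (l1 l2 : List Int) :
    pvH rep (l1 ++ l2) = pvH rep l1 * 10 ^ l2.length + pvH rep l2 := by
  unfold pvH
  rw [List.foldl_append, pvH_acc]
  rfl

-- the divide-and-conquer combine computes (Horner value, 10^length) on nonempty chunks
theorem pvGo_spec (rep : Int) : ∀ (n : Nat) (chunk : List Int), chunk.length ≤ n →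
    chunk ≠ [] → pvGo rep n chunk = (pvH rep chunk, 10 ^ chunk.length) := by
  intro n
  induction n with
  | zero => intro chunk h hne; cases chunk with
    | nil => exact absurd rfl hne
    | cons x t => simp at h
  | succ n ih =>
    intro chunk h _
    match chunk with
    | [d] => simp [pvGo, pvH]
    | x :: y :: t =>
      rw [pvGo]
      have hlen : (x :: y :: t).length = t.length + 2 := by simp
      set c := x :: y :: t with hc
      set m := c.length / 2 with hm
      have hm1 : 1 ≤ m := by rw [hm, hc]; simp; omega
      have hmlt : m < c.length := by rw [hm, hc]; simp; omega
      have htake : (c.take m).length = m := by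
        rw [List.length_take]; omega
      have hdrop : (c.drop m).length = c.length - m := List.length_drop
      have hcn : c.length ≤ n + 1 := h
      rw [ih (c.take m) (by omega) (by
            intro he; have := congrArg List.length he; simp [htake] at this; omega),
          ih (c.drop m) (by omega) (by
            intro he; have := congrArg List.length he; simp [hdrop] at this; omega)]
      simp only
      have hsplit : c = c.take m ++ c.drop m := (List.take_append_drop m c).symm
      simp only [Prod.mk.injEq]
      constructor
      · conv_rhs => rw [hsplit]
        rw [pvH_append]
      · rw [htake, hdrop, ← pow_add]
        congr 1
        omega

-- ===== VERDICT =====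
theorem generateNumber_spec : Claim_equal_generateNumber := by
  intro rep l _
  show _ = _
  unfold generateNumber_alt
  by_cases hl : l = []
  · subst hl; simp [generateNumber]
  · rw [if_neg hl, pvGo_spec rep l.length l le_rfl hl]
    rfl
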